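-- pv_equiv track=rewrite | github.com/ReneFabricius/project-euler | pr73.py | problem73
-- ===== SOURCE A (Python) =====
-- def problem73(d, ff, sf):
--     "Spocita pocet prvkov vo Fareyho postupnosti pre d medzi ff a sf"
--     F = [ff, sf]
--     f = False
--     while not f:
--         f = True
--         Fn = []
--         for i in range(len(F) - 1):
--             Fn.append(F[i])
--             nf = (F[i][0] + F[i + 1][0], F[i][1] + F[i + 1][1])
--             if nf[1] <= d:
--                 Fn.append(nf)
--                 f = False
--         Fn.append(F[-1])
--         F = Fn
--
--     return F, len(F) - 2
-- ===== SOURCE B (Python) =====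
-- def problem73(d, ff, sf):
--     "Spocita pocet prvkov vo Fareyho postupnosti pre d medzi ff a sf"
--     # Stern-Brocot mediant traversal with an explicit stack: each fraction is
--     # emitted once, in order, instead of rebuilding the list pass after pass.
--     F = [ff]
--     stack = [(ff, sf)]
--     while stack:
--         l, r = stack.pop()
--         nf = (l[0] + r[0], l[1] + r[1])
--         if nf[1] <= d:
--             stack.append((nf, r))
--             stack.append((l, nf))
--         else:
--             F.append(r)
--     return F, len(F) - 2
-- ===== Notes on version B (the rewrite author's own statement) =====
-- stated objective: alternative
-- what changed: A repeatedly rebuilds the whole fraction list, one mediant-insertion pass after another, until a pass inserts nothing; B does a single explicit-stack Stern-Brocot traversal that emits each fraction exactly once, in order.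
import Mathlib
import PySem

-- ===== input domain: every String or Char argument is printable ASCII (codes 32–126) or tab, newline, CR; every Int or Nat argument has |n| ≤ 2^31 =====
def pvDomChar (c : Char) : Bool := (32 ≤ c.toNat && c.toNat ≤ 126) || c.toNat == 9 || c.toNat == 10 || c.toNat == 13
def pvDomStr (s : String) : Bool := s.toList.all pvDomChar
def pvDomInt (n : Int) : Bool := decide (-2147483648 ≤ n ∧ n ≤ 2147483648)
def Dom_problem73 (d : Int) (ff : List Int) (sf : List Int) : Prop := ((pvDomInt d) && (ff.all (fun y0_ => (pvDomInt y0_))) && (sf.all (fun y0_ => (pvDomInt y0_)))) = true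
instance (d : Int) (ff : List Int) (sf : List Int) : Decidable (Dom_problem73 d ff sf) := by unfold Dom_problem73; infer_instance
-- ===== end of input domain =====

-- B replaces A's repeated whole-list mediant passes (rebuilding the list until a pass
-- inserts nothing) by a single explicit-stack Stern-Brocot traversal that emits every
-- fraction exactly once, in order; objective: alternative algorithm, same results.

-- ===== PORT A =====

-- mediant of two fractions, read as in Python: F[i][0]+F[i+1][0], F[i][1]+F[i+1][1]
-- (indices 0 and 1 always exist on inputs admitted by Pre_; getD 0 is a totality default only)
def pvMed (x y : List Int) : List Int := [x.getD 0 0 + y.getD 0 0, x.getD 1 0 + y.getD 1 0]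

-- one pass of A's while-body: walk adjacent pairs, keep each element, insert the
-- mediant when its denominator is ≤ d; the Bool is A's flag f (true = no insertion)
def pvPassA (d : Int) : List (List Int) → List (List Int) × Bool
  | x :: y :: rest =>
      let p := pvPassA d (y :: rest)
      let m := pvMed x y
      if m.getD 1 0 ≤ d then (x :: m :: p.1, false) else (x :: p.1, p.2)
  | l => (l, true)

-- A's while-loop; the Nat is a totality fuel only: on inputs admitted by Pre_ the flag
-- exit (f = true) fires before the fuel runs out (proved below)
def pvLoopA (d : Int) : Nat → List (List Int) → List (List Int)
  | 0, F => F
  | n + 1, F => let p := pvPassA d F; if p.2 then p.1 else pvLoopA d n p.1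

def problem73 (d : Int) (ff : List Int) (sf : List Int) : List (List Int) × Int :=
  let F := pvLoopA d (d.toNat + 2) [ff, sf]
  (F, (F.length : Int) - 2)

-- ===== PORT B =====

-- B's while-loop over the explicit stack; each frame carries a depth budget (a totality
-- guard only, never exhausted on inputs admitted by Pre_: the mediant test fails first)
def pvRunB (d : Int) : List (List Int) → List (Nat × List Int × List Int) → List (List Int)
  | out, [] => out
  | out, (0, _, r) :: st => pvRunB d (out ++ [r]) st
  | out, (k + 1, l, r) :: st =>
      let m := pvMed l r
      if m.getD 1 0 ≤ d then pvRunB d out ((k, l, m) :: (k, m, r) :: st)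
      else pvRunB d (out ++ [r]) st
termination_by _ st => (st.map (fun f => 3 ^ f.1)).sum
decreasing_by all_goals simp [Nat.pow_succ]; try nlinarith [pow_pos (show (0:ℕ) < 3 by norm_num) k]

def problem73_alt (d : Int) (ff : List Int) (sf : List Int) : List (List Int) × Int :=
  let F := pvRunB d [ff] [(d.toNat + 2, ff, sf)]
  (F, (F.length : Int) - 2)

-- ===== PRECONDITION & SPEC =====
-- Pre_ is exactly where the Python A returns: both endpoint fractions must have at least
-- two components (else A raises IndexError), and either the two denominators already sum
-- above d (the loop inserts nothing and stops) or both denominators are ≥ 1 (then every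
-- mediant denominator strictly grows and the loop terminates); with a denominator ≤ 0 and
-- sum ≤ d the pass next to that endpoint inserts forever and A diverges.
def Pre_problem73 (d : Int) (ff : List Int) (sf : List Int) : Prop :=
  2 ≤ ff.length ∧ 2 ≤ sf.length ∧
    (d < ff.getD 1 0 + sf.getD 1 0 ∨ (1 ≤ ff.getD 1 0 ∧ 1 ≤ sf.getD 1 0))
instance (d : Int) (ff : List Int) (sf : List Int) : Decidable (Pre_problem73 d ff sf) := by
  unfold Pre_problem73; infer_instance

def pvWitness_problem73 : Int × List Int × List Int := (4, ([1, 3], [1, 2]))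

def Spec_problem73 (d : Int) (ff : List Int) (sf : List Int) (out : List (List Int) × Int) : Prop := out = problem73_alt d ff sf
instance (d : Int) (ff : List Int) (sf : List Int) (out : List (List Int) × Int) : Decidable (Spec_problem73 d ff sf out) := by unfold Spec_problem73; infer_instance

-- ===== CLAIM (what is proved, stated in full; the proofs are below) =====
def Claim_equal_problem73 : Prop := ∀ (d : Int) (ff : List Int) (sf : List Int), Dom_problem73 d ff sf → Pre_problem73 d ff sf → Spec_problem73 d ff sf (problem73 d ff sf)

-- ===== LEMMAS AND PROOFS =====

-- the in-order Stern-Brocot mediant tree between l and r, truncated at depth k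
def pvTree (d : Int) : Nat → List Int → List Int → List (List Int)
  | 0, _, _ => []
  | k + 1, l, r =>
      let m := pvMed l r
      if m.getD 1 0 ≤ d then pvTree d k l m ++ m :: pvTree d k (pvMed l r) r else []

-- true iff the depth-k expansion between l and r is already complete (no insertion left)
def pvDone (d : Int) : Nat → List Int → List Int → Bool
  | 0, l, r => decide (d < (pvMed l r).getD 1 0)
  | k + 1, l, r =>
      let m := pvMed l r
      if m.getD 1 0 ≤ d then pvDone d k l m && pvDone d k (pvMed l r) r else true

theorem pvMed_den (l r : List Int) : (pvMed l r).getD 1 0 = l.getD 1 0 + r.getD 1 0 := rfl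

-- single-step unfolding equations (rfl), to unfold exactly one level at a time
theorem pvTree_zero (d : Int) (l r : List Int) : pvTree d 0 l r = [] := rfl

theorem pvTree_succ_eq (d : Int) (k : Nat) (l r : List Int) :
    pvTree d (k + 1) l r =
      if (pvMed l r).getD 1 0 ≤ d then
        pvTree d k l (pvMed l r) ++ pvMed l r :: pvTree d k (pvMed l r) r
      else [] := rfl

theorem pvDone_zero (d : Int) (l r : List Int) :
    pvDone d 0 l r = decide (d < (pvMed l r).getD 1 0) := rfl

theorem pvDone_succ_eq (d : Int) (k : Nat) (l r : List Int) :
    pvDone d (k + 1) l r =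
      if (pvMed l r).getD 1 0 ≤ d then
        pvDone d k l (pvMed l r) && pvDone d k (pvMed l r) r
      else true := rfl

theorem pvPassA_cons2 (d : Int) (x y : List Int) (rest : List (List Int)) :
    pvPassA d (x :: y :: rest) =
      if (pvMed x y).getD 1 0 ≤ d then
        (x :: pvMed x y :: (pvPassA d (y :: rest)).1, false)
      else (x :: (pvPassA d (y :: rest)).1, (pvPassA d (y :: rest)).2) := rfl

theorem pvLoopA_succ_eq (d : Int) (n : Nat) (F : List (List Int)) :
    pvLoopA d (n + 1) F =
      if (pvPassA d F).2 then (pvPassA d F).1 else pvLoopA d n (pvPassA d F).1 := rfl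

theorem pvDone_succ (d : Int) (k : Nat) (l r : List Int) (h : pvDone d k l r = true) :
    pvDone d (k + 1) l r = true := by
  induction k generalizing l r with
  | zero =>
    rw [pvDone_zero, decide_eq_true_eq] at h
    rw [pvDone_succ_eq, if_neg (by omega)]
  | succ k ih =>
    rw [pvDone_succ_eq] at h
    rw [pvDone_succ_eq]
    split_ifs at h ⊢ with hm
    · simp only [Bool.and_eq_true] at h ⊢
      exact ⟨ih _ _ h.1, ih _ _ h.2⟩
    · rfl

theorem pvDone_add (d : Int) (k i : Nat) (l r : List Int) (h : pvDone d k l r = true) :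
    pvDone d (k + i) l r = true := by
  induction i with
  | zero => exact h
  | succ i ih => exact pvDone_succ d (k + i) l r ih

theorem pvDone_tree (d : Int) (k : Nat) (l r : List Int) (h : pvDone d k l r = true) :
    pvTree d (k + 1) l r = pvTree d k l r := by
  induction k generalizing l r with
  | zero =>
    rw [pvDone_zero, decide_eq_true_eq] at h
    rw [pvTree_succ_eq, if_neg (by omega), pvTree_zero]
  | succ k ih =>
    rw [pvDone_succ_eq] at h
    rw [pvTree_succ_eq d (k + 1) l r, pvTree_succ_eq d k l r]
    split_ifs at h ⊢ with hm
    · simp only [Bool.and_eq_true] at h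
      rw [ih _ _ h.1, ih _ _ h.2]
    · rfl

theorem pvTree_add (d : Int) (k i : Nat) (l r : List Int) (h : pvDone d k l r = true) :
    pvTree d (k + i) l r = pvTree d k l r := by
  induction i with
  | zero => rfl
  | succ i ih =>
    rw [show k + (i + 1) = (k + i) + 1 from rfl,
      pvDone_tree d (k + i) l r (pvDone_add d k i l r h), ih]

theorem pvDone_of_big (d : Int) (k : Nat) (l r : List Int)
    (h1 : 1 ≤ l.getD 1 0) (h2 : 1 ≤ r.getD 1 0)
    (hk : d + 1 ≤ l.getD 1 0 + r.getD 1 0 + k) : pvDone d k l r = true := by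
  induction k generalizing l r with
  | zero =>
    rw [pvDone_zero, decide_eq_true_eq, pvMed_den]
    omega
  | succ k ih =>
    rw [pvDone_succ_eq]
    split_ifs with hm
    · rw [ih l (pvMed l r) h1 (by rw [pvMed_den]; omega) (by rw [pvMed_den]; omega),
        ih (pvMed l r) r (by rw [pvMed_den]; omega) h2 (by rw [pvMed_den]; omega)]
      rfl
    · rfl

theorem pvPassA_tree (d : Int) (k : Nat) (l r : List Int) (zs : List (List Int)) :
    pvPassA d (l :: (pvTree d k l r ++ r :: zs)) =
      (l :: (pvTree d (k + 1) l r ++ (pvPassA d (r :: zs)).1),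
        pvDone d k l r && (pvPassA d (r :: zs)).2) := by
  induction k generalizing l r zs with
  | zero =>
    rw [pvTree_zero, List.nil_append, pvPassA_cons2, pvTree_succ_eq, pvTree_zero, pvDone_zero,
      pvTree_zero]
    split_ifs with hm
    · rw [decide_eq_false (show ¬ d < (pvMed l r).getD 1 0 by omega)]
      simp
    · rw [decide_eq_true (show d < (pvMed l r).getD 1 0 by omega)]
      simp
  | succ k ih =>
    by_cases hm : (pvMed l r).getD 1 0 ≤ d
    · have htree : pvTree d (k + 1) l r =
          pvTree d k l (pvMed l r) ++ pvMed l r :: pvTree d k (pvMed l r) r := by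
        rw [pvTree_succ_eq, if_pos hm]
      have htree2 : pvTree d (k + 1 + 1) l r =
          pvTree d (k + 1) l (pvMed l r) ++ pvMed l r :: pvTree d (k + 1) (pvMed l r) r := by
        rw [pvTree_succ_eq, if_pos hm]
      have hdone : pvDone d (k + 1) l r =
          (pvDone d k l (pvMed l r) && pvDone d k (pvMed l r) r) := by
        rw [pvDone_succ_eq, if_pos hm]
      rw [htree, htree2, hdone,
        show l :: ((pvTree d k l (pvMed l r) ++ pvMed l r :: pvTree d k (pvMed l r) r) ++ r :: zs)
            = l :: (pvTree d k l (pvMed l r) ++ pvMed l r :: (pvTree d k (pvMed l r) r ++ r :: zs)) by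
          simp [List.append_assoc],
        ih l (pvMed l r) (pvTree d k (pvMed l r) r ++ r :: zs),
        ih (pvMed l r) r zs]
      simp [List.append_assoc, Bool.and_assoc]
    · have htree : pvTree d (k + 1) l r = [] := by rw [pvTree_succ_eq, if_neg hm]
      have htree2 : pvTree d (k + 1 + 1) l r = [] := by rw [pvTree_succ_eq, if_neg hm]
      have hdone : pvDone d (k + 1) l r = true := by rw [pvDone_succ_eq, if_neg hm]
      rw [htree, htree2, hdone, List.nil_append, List.nil_append, pvPassA_cons2, if_neg hm,
        Bool.true_and]

theorem pvPassA_tree' (d : Int) (k : Nat) (l r : List Int) :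
    pvPassA d (l :: pvTree d k l r ++ [r]) =
      (l :: pvTree d (k + 1) l r ++ [r], pvDone d k l r) := by
  have h := pvPassA_tree d k l r []
  have hbase : pvPassA d (r :: ([] : List (List Int))) = ([r], true) := rfl
  rw [hbase] at h
  simpa using h

theorem pvLoopA_tree (d : Int) (n k : Nat) (l r : List Int)
    (h : pvDone d (k + n) l r = true) :
    pvLoopA d (n + 1) (l :: pvTree d k l r ++ [r]) = l :: pvTree d (k + n + 1) l r ++ [r] := by
  induction n generalizing k with
  | zero =>
    rw [pvLoopA_succ_eq, pvPassA_tree']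
    split_ifs <;> rfl
  | succ n ih =>
    rw [pvLoopA_succ_eq, pvPassA_tree']
    by_cases hdk : pvDone d k l r = true
    · rw [if_pos hdk]
      have : pvTree d (k + (n + 1) + 1) l r = pvTree d (k + 1) l r := by
        rw [show k + (n + 1) + 1 = (k + 1) + (n + 1) by omega]
        exact pvTree_add d (k + 1) (n + 1) l r (pvDone_succ d k l r hdk)
      rw [this]
    · rw [if_neg (by simpa using hdk)]
      have h' : pvDone d ((k + 1) + n) l r = true := by
        rw [show (k + 1) + n = k + (n + 1) by omega]; exact h
      have hres := ih (k + 1) h'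
      rw [hres, show (k + 1) + n + 1 = k + (n + 1) + 1 by omega]

theorem pvRunB_tree (d : Int) (k : Nat) (l r : List Int)
    (out : List (List Int)) (st : List (Nat × List Int × List Int))
    (h1 : 1 ≤ l.getD 1 0) (h2 : 1 ≤ r.getD 1 0)
    (hk : d + 2 ≤ l.getD 1 0 + r.getD 1 0 + k) :
    pvRunB d out ((k, l, r) :: st) = pvRunB d (out ++ pvTree d k l r ++ [r]) st := by
  induction k generalizing l r out st with
  | zero =>
    have hstep : pvRunB d out ((0, l, r) :: st) = pvRunB d (out ++ [r]) st := by
      simp only [pvRunB]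
    rw [hstep, pvTree_zero, List.append_nil]
  | succ k ih =>
    have hstep : pvRunB d out ((k + 1, l, r) :: st) =
        if (pvMed l r).getD 1 0 ≤ d then pvRunB d out ((k, l, pvMed l r) :: (k, pvMed l r, r) :: st)
        else pvRunB d (out ++ [r]) st := by simp only [pvRunB]
    rw [hstep]
    split_ifs with hm
    · rw [ih l (pvMed l r) out ((k, pvMed l r, r) :: st) h1
        (by rw [pvMed_den]; omega) (by rw [pvMed_den]; omega),
        ih (pvMed l r) r (out ++ pvTree d k l (pvMed l r) ++ [pvMed l r]) st
        (by rw [pvMed_den]; omega) h2 (by rw [pvMed_den]; omega),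
        pvTree_succ_eq, if_pos hm]
      simp [List.append_assoc]
    · rw [pvTree_succ_eq, if_neg hm, List.append_nil]

-- ===== VERDICT (by name: the statement is the Claim_ definition above) =====
theorem problem73_spec : Claim_equal_problem73 := by
  intro d ff sf _hdom hpre
  obtain ⟨_hf, _hs, hor⟩ := hpre
  unfold Spec_problem73 problem73 problem73_alt
  rcases hor with hgt | ⟨h1, h2⟩
  · -- first pass inserts nothing: both results are [ff, sf]
    have hm : ¬ (pvMed ff sf).getD 1 0 ≤ d := by rw [pvMed_den]; omega
    have hA : pvLoopA d (d.toNat + 2) [ff, sf] = [ff, sf] := by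
      have hdone : pvDone d (0 + (d.toNat + 1)) ff sf = true := by
        rw [show 0 + (d.toNat + 1) = d.toNat + 1 by omega, pvDone_succ_eq, if_neg hm]
      have hloop := pvLoopA_tree d (d.toNat + 1) 0 ff sf hdone
      have htree : pvTree d (0 + (d.toNat + 1) + 1) ff sf = [] := by
        rw [show 0 + (d.toNat + 1) + 1 = (d.toNat + 1) + 1 by omega, pvTree_succ_eq, if_neg hm]
      rw [htree, pvTree_zero] at hloop
      simpa using hloop
    have hB : pvRunB d [ff] [(d.toNat + 2, ff, sf)] = [ff, sf] := by
      have hstep : pvRunB d [ff] [(d.toNat + 1 + 1, ff, sf)] =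
          if (pvMed ff sf).getD 1 0 ≤ d then
            pvRunB d [ff] [(d.toNat + 1, ff, pvMed ff sf), (d.toNat + 1, pvMed ff sf, sf)]
          else pvRunB d ([ff] ++ [sf]) [] := by simp only [pvRunB]
      rw [show d.toNat + 2 = d.toNat + 1 + 1 from rfl, hstep, if_neg hm]
      simp [pvRunB]
    rw [hA, hB]
  · -- both denominators ≥ 1: both results are ff :: full tree ++ [sf]
    have hA : pvLoopA d (d.toNat + 2) [ff, sf] =
        ff :: pvTree d (d.toNat + 2) ff sf ++ [sf] := by
      have hdone : pvDone d (0 + (d.toNat + 1)) ff sf = true := by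
        apply pvDone_of_big d _ ff sf h1 h2
        omega
      have hloop := pvLoopA_tree d (d.toNat + 1) 0 ff sf hdone
      rw [pvTree_zero] at hloop
      rw [show (d.toNat + 2 : Nat) = (d.toNat + 1) + 1 from rfl]
      rw [show 0 + (d.toNat + 1) + 1 = d.toNat + 1 + 1 by omega] at hloop
      simpa using hloop
    have hB : pvRunB d [ff] [(d.toNat + 2, ff, sf)] =
        ff :: pvTree d (d.toNat + 2) ff sf ++ [sf] := by
      rw [pvRunB_tree d (d.toNat + 2) ff sf [ff] [] h1 h2 (by omega)]
      simp [pvRunB]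
    rw [hA, hB]
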